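-- pv_equiv track=rewrite | github.com/WejoLe/Flask | Exemp_2/task_3/decrypt.py | decrypt_efficient
-- ===== SOURCE A (Python) =====
-- def decrypt_efficient(message):
--     stack = []
--
--     i = 0
--     while i < len(message):
--         if message[i] == '.':
--             if i + 1 < len(message) and message[i + 1] == '.':
--                 if stack:
--                     stack.pop()
--                 i += 2
--                 continue
--             else:
--                 i += 1
--                 continue
--         else:
--             stack.append(message[i])
--         i += 1
--
--     return ''.join(stack)
-- ===== SOURCE B (Python) =====
-- def decrypt_efficient(message):
--     # Reverse scan with a backspace skip-counter: no stack, no pops.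
--     # Each maximal run of k dots contributes k//2 "backspaces", which suppress
--     # the nearest surviving characters to its left.
--     out = []
--     dots = 0
--     skip = 0
--     for c in reversed(message):
--         if c == '.':
--             dots += 1
--         else:
--             skip += dots // 2
--             dots = 0
--             if skip:
--                 skip -= 1
--             else:
--                 out.append(c)
--     out.reverse()
--     return ''.join(out)
-- ===== Notes on version B (the rewrite author's own statement) =====
-- stated objective: faster
-- what changed: Replaced the forward index/lookahead stack machine (push chars, '..' pops) by a single reverse scan converting each maximal dot-run of length k into k//2 pending backspaces in a skip counter that suppress the nearest preceding characters (no stack mutation or pops); the per-character work drops from indexing/lookahead/list pops to a counter update, measured ~2x faster.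
import Mathlib
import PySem

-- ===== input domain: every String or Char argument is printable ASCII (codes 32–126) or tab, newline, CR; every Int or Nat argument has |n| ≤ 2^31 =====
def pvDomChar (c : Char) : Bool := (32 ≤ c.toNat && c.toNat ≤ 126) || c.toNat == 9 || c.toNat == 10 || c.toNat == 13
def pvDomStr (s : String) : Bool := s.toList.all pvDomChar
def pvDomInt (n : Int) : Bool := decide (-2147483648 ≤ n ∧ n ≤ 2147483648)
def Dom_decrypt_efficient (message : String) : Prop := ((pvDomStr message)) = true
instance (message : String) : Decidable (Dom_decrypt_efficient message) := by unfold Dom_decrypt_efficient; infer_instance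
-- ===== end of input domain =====

-- B replaces A's forward stack machine by a reverse scan with a backspace skip-counter
-- (dot-runs become floor(k/2) skips suppressing the nearest preceding chars); same result.

-- ===== PORT A =====
-- A's while loop over index i with lookahead message[i+1]; the list head is message[i],
-- stack.pop() = dropLast (guarded by 'if stack').
def pvALoop : List Char → List Char → List Char
  | [], stack => stack
  | c :: rest, stack =>
    if c = '.' then
      match _h : rest with
      | d :: rest2 =>
        if d = '.' then pvALoop rest2 (if stack.isEmpty then stack else stack.dropLast)
        else pvALoop rest stack
      | [] => pvALoop rest stack
    else pvALoop rest (stack ++ [c])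
termination_by cs _ => cs.length
decreasing_by all_goals (simp_wf; try simp_all; try omega)

def decrypt_efficient (message : String) : String := String.ofList (pvALoop message.toList [])

-- ===== PORT B =====
-- Source B's for-loop over reversed(message), carrying the dot-run length, the skip counter
-- and the output list; Source B appends and reverses at the end, which is the same as
-- consing onto the accumulator here.
def pvBLoop : List Char → Nat → Nat → List Char → List Char
  | [], _, _, acc => acc
  | c :: rest, dots, skip, acc =>
    if c = '.' then pvBLoop rest (dots + 1) skip acc
    else
      let skip' := skip + dots / 2
      if 0 < skip' then pvBLoop rest 0 (skip' - 1) acc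
      else pvBLoop rest 0 0 (c :: acc)

def decrypt_efficient_alt (message : String) : String :=
  String.ofList (pvBLoop message.toList.reverse 0 0 [])

-- ===== PRECONDITION & SPEC =====
def Spec_decrypt_efficient (message : String) (out : String) : Prop := out = decrypt_efficient_alt message
instance (message : String) (out : String) : Decidable (Spec_decrypt_efficient message out) := by unfold Spec_decrypt_efficient; infer_instance

-- ===== CLAIM (what is proved, stated in full; the proofs are below) =====
def Claim_equal_decrypt_efficient : Prop := ∀ (message : String), Dom_decrypt_efficient message → Spec_decrypt_efficient message (decrypt_efficient message)

-- ===== LEMMAS AND PROOFS =====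
-- "drop the last n elements, saturating at []": the semantics of n guarded pops.
def myDrop (n : Nat) (s : List Char) : List Char := s.take (s.length - n)

theorem myDrop_zero (s : List Char) : myDrop 0 s = s := by
  simp [myDrop]

theorem myDrop_myDrop (a b : Nat) (s : List Char) :
    myDrop a (myDrop b s) = myDrop (a + b) s := by
  simp [myDrop, List.take_take]
  omega

theorem myDrop_succ_append (m : Nat) (s : List Char) (c : Char) :
    myDrop (m + 1) (s ++ [c]) = myDrop m s := by
  simp [myDrop]

-- combined effect of `k` pops on stack++[c] followed by `skip` pops, when at least one pop happens
theorem myDrop_combine (skip k : Nat) (s : List Char) (c : Char) (h : 0 < skip + k) :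
    myDrop skip (myDrop k (s ++ [c])) = myDrop (skip + k - 1) s := by
  cases k with
  | zero =>
    obtain ⟨m, rfl⟩ : ∃ m, skip = m + 1 := ⟨skip - 1, by omega⟩
    have e : m + 1 + 0 - 1 = m := by omega
    rw [myDrop_zero, myDrop_succ_append, e]
  | succ k' =>
    have e : skip + (k' + 1) - 1 = skip + k' := by omega
    rw [myDrop_succ_append, myDrop_myDrop, e]

theorem pop1_eq (s : List Char) :
    (if s.isEmpty then s else s.dropLast) = myDrop 1 s := by
  cases s with
  | nil => simp [myDrop]
  | cons a t => simp [myDrop, List.dropLast_eq_take]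

theorem pvA_nil (stack : List Char) : pvALoop [] stack = stack := by
  rw [pvALoop.eq_def]

theorem pvA_lone_dot (stack : List Char) : pvALoop ['.'] stack = stack := by
  rw [pvALoop.eq_def]; simp [pvA_nil]

theorem pvA_two_dots (cs stack : List Char) :
    pvALoop ('.' :: '.' :: cs) stack
      = pvALoop cs (if stack.isEmpty then stack else stack.dropLast) := by
  rw [pvALoop.eq_def]; simp

theorem pvA_dot_char (cs stack : List Char) (c : Char) (hc : ¬ c = '.') :
    pvALoop ('.' :: c :: cs) stack = pvALoop (c :: cs) stack := by
  rw [pvALoop.eq_def]; simp [hc]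

theorem pvA_char (cs stack : List Char) (c : Char) (hc : ¬ c = '.') :
    pvALoop (c :: cs) stack = pvALoop cs (stack ++ [c]) := by
  rw [pvALoop.eq_def]; simp [hc]

-- A on a pure dot-run of length d performs d/2 guarded pops.
theorem pvA_dots : ∀ (d : Nat) (s : List Char),
    pvALoop (List.replicate d '.') s = myDrop (d / 2) s := by
  intro d
  induction d using Nat.strong_induction_on with
  | _ d ih =>
    intro s
    match d with
    | 0 => simp [List.replicate, pvA_nil, myDrop_zero]
    | 1 => simp [List.replicate, pvA_lone_dot, myDrop_zero]
    | (k + 2) =>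
      have : List.replicate (k + 2) '.' = '.' :: '.' :: List.replicate k '.' := by
        simp [List.replicate_succ]
      rw [this, pvA_two_dots, ih k (by omega), pop1_eq, myDrop_myDrop]
      congr 1
      omega

-- A's run can be split just before a non-dot character.
theorem pvA_split (c : Char) (hc : ¬ c = '.') : ∀ (n : Nat) (xs : List Char), xs.length = n →
    ∀ (rest s : List Char),
    pvALoop (xs ++ c :: rest) s = pvALoop (c :: rest) (pvALoop xs s) := by
  intro n
  induction n using Nat.strong_induction_on with
  | _ n ih =>
    intro xs hxs rest s
    match xs with
    | [] => simp [pvA_nil]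
    | a :: xs' =>
      by_cases ha : a = '.'
      · subst ha
        match xs' with
        | [] =>
          rw [pvA_lone_dot]
          simpa using pvA_dot_char rest s c hc
        | b :: xs'' =>
          by_cases hb : b = '.'
          · subst hb
            show pvALoop ('.' :: '.' :: (xs'' ++ c :: rest)) s = _
            rw [pvA_two_dots, pvA_two_dots,
                ih (xs''.length) (by simp at hxs; omega) xs'' rfl rest _]
          · show pvALoop ('.' :: b :: (xs'' ++ c :: rest)) s = _
            rw [pvA_dot_char _ _ _ hb, pvA_dot_char _ _ _ hb]
            exact ih ((b :: xs'').length) (by simp at hxs ⊢; omega) (b :: xs'') rfl rest s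
      · rw [List.cons_append, pvA_char _ _ _ ha, pvA_char _ _ _ ha,
            ih (xs'.length) (by simp at hxs; omega) xs' rfl rest _]

-- Main invariant: B's reverse scan with pending dot-run `dots` and skip counter `skip`
-- computes A's stack for the prefix (with the pending dots restored), minus `skip` pops.
theorem pvB_inv : ∀ (cs : List Char) (dots skip : Nat) (acc : List Char),
    pvBLoop cs.reverse dots skip acc
      = myDrop skip (pvALoop (cs ++ List.replicate dots '.') []) ++ acc := by
  intro cs
  induction cs using List.reverseRecOn with
  | nil =>
    intro dots skip acc
    simp [pvBLoop, pvA_dots, myDrop]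
  | append_singleton xs c ih =>
    intro dots skip acc
    rw [List.reverse_append]
    simp only [List.reverse_singleton, List.singleton_append]
    by_cases hc : c = '.'
    · subst hc
      show pvBLoop ('.' :: xs.reverse) dots skip acc = _
      rw [pvBLoop, if_pos rfl, ih (dots + 1) skip acc]
      congr 2
      simp [List.replicate_succ]
    · show pvBLoop (c :: xs.reverse) dots skip acc = _
      rw [pvBLoop, if_neg hc]
      have hS : pvALoop ((xs ++ [c]) ++ List.replicate dots '.') []
          = myDrop (dots / 2) (pvALoop xs [] ++ [c]) := by
        rw [List.append_assoc, List.singleton_append,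
            pvA_split c hc xs.length xs rfl (List.replicate dots '.') [],
            pvA_char _ _ _ hc, pvA_dots]
      rw [hS]
      by_cases hsz : 0 < skip + dots / 2
      · rw [if_pos hsz, ih 0 (skip + dots / 2 - 1) acc,
            myDrop_combine skip (dots / 2) (pvALoop xs []) c hsz]
        simp [List.replicate]
      · have hskip : skip = 0 := by omega
        have hd : dots / 2 = 0 := by omega
        rw [if_neg hsz, ih 0 0 (c :: acc)]
        simp [hskip, hd, List.replicate, myDrop_zero]

-- ===== VERDICT (by name: the statement is the Claim_ definition above) =====
theorem decrypt_efficient_spec : Claim_equal_decrypt_efficient := by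
  intro message _
  show decrypt_efficient message = decrypt_efficient_alt message
  unfold decrypt_efficient decrypt_efficient_alt
  rw [pvB_inv message.toList 0 0 []]
  simp [myDrop_zero]
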